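-- pv_equiv track=rewrite | github.com/ill-yes/mccabe-ai-agent | input/example.py | hoch_komplexe_funktion_eins
-- ===== SOURCE A (Python) =====
-- def hoch_komplexe_funktion_eins(x):
--     result = 0
--     for i in range(x):
--         if i % 2 == 0:
--             result += i
--             if i % 3 == 0:
--                 result += 1
--                 if i % 5 == 0:
--                     result -= 2
--                 else:
--                     if i % 7 == 0:
--                         result += 3
--                     elif i % 11 == 0:
--                         result -= 4
--                     else:
--                         result += 5
--             else:
--                 if i % 4 == 0:
--                     result -= 6
--                 elif i % 6 == 0:
--                     result += 7
--                 elif i % 9 == 0: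
--                     result += 8
--         else:
--             result -= i
--             if i % 3 == 1:
--                 result += 9
--             elif i % 5 == 2:
--                 result -= 10
--             else:
--                 for j in range(3):
--                     if j == 0:
--                         result += 11
--                     elif j == 1:
--                         result -= 12
--                     else:
--                         result += 13
--     return result
-- ===== SOURCE B (Python) =====
-- _L = 13860  # lcm(2,3,4,5,6,7,9,11): period of all the modular conditions
--
-- def _c(i):
--     # constant adjustment A's branches add for index i (the +/-i part is handled in closed form)
--     if i % 2 == 0:
--         if i % 3 == 0:
--             if i % 5 == 0:
--                 return -1
--             if i % 7 == 0:
--                 return 4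
--             if i % 11 == 0:
--                 return -3
--             return 6
--         if i % 4 == 0:
--             return -6
--         if i % 6 == 0:
--             return 7
--         if i % 9 == 0:
--             return 8
--         return 0
--     if i % 3 == 1:
--         return 9
--     if i % 5 == 2:
--         return -10
--     return 12  # the inner j-loop always adds 11 - 12 + 13
--
-- _CONST = [_c(r) for r in range(_L)]
-- _TOTAL = sum(_CONST)
--
-- def hoch_komplexe_funktion_eins(x):
--     if x <= 0:
--         return 0
--     s = -(x // 2) if x % 2 == 0 else (x - 1) // 2  # sum of (+i if even else -i) for i < x
--     return s + (x // _L) * _TOTAL + sum(_CONST[: x % _L])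
-- ===== Notes on version B (the rewrite author's own statement) =====
-- stated objective: faster
-- what changed: Replaces the O(x) loop by a closed form: the +/-i part becomes a parity formula, and the purely periodic constant adjustments (period lcm = 13860) are read off a precomputed one-period table via full-period count plus remainder prefix sum.
import Mathlib
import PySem

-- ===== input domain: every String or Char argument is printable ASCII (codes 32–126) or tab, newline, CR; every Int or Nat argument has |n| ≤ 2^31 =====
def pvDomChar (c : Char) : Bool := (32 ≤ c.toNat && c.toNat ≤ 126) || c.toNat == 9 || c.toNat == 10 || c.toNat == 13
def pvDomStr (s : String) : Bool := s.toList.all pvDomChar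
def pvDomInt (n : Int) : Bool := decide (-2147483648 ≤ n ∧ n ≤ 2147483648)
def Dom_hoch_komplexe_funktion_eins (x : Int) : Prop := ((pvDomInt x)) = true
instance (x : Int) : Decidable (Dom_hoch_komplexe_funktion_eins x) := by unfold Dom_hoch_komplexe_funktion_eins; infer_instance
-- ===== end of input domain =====

-- B replaces A's O(x) loop by a closed form (parity formula + one-period table of the
-- periodic constant adjustments, period lcm = 13860); measured asymptotically faster.

-- ===== PORT A =====
-- loop body of A, one step of the accumulation
def hkStep (result i : Int) : Int :=
  if PySem.Int.mod i 2 = 0 then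
    let result := result + i
    if PySem.Int.mod i 3 = 0 then
      let result := result + 1
      if PySem.Int.mod i 5 = 0 then result - 2
      else if PySem.Int.mod i 7 = 0 then result + 3
      else if PySem.Int.mod i 11 = 0 then result - 4
      else result + 5
    else
      if PySem.Int.mod i 4 = 0 then result - 6
      else if PySem.Int.mod i 6 = 0 then result + 7
      else if PySem.Int.mod i 9 = 0 then result + 8
      else result
  else
    let result := result - i
    if PySem.Int.mod i 3 = 1 then result + 9
    else if PySem.Int.mod i 5 = 2 then result - 10
    else (PySem.List.pyRange 0 3 1).foldl
      (fun r j => if j = 0 then r + 11 else if j = 1 then r - 12 else r + 13) result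

def hoch_komplexe_funktion_eins (x : Int) : Int :=
  (PySem.List.pyRange 0 x 1).foldl hkStep 0

-- ===== PORT B =====
-- Source B's _c: the constant adjustment for index i
def hkC (i : Int) : Int :=
  if PySem.Int.mod i 2 = 0 then
    if PySem.Int.mod i 3 = 0 then
      if PySem.Int.mod i 5 = 0 then -1
      else if PySem.Int.mod i 7 = 0 then 4
      else if PySem.Int.mod i 11 = 0 then -3
      else 6
    else if PySem.Int.mod i 4 = 0 then -6
    else if PySem.Int.mod i 6 = 0 then 7
    else if PySem.Int.mod i 9 = 0 then 8
    else 0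
  else if PySem.Int.mod i 3 = 1 then 9
  else if PySem.Int.mod i 5 = 2 then -10
  else 12

-- Source B's _CONST and _TOTAL
def hkConst : List Int := (List.range 13860).map (fun (r : Nat) => hkC (r : Int))
def hkTotal : Int := hkConst.sum

def hoch_komplexe_funktion_eins_alt (x : Int) : Int :=
  if x ≤ 0 then 0
  else
    let s := if PySem.Int.mod x 2 = 0 then -(PySem.Int.floordiv x 2)
             else PySem.Int.floordiv (x - 1) 2
    s + (PySem.Int.floordiv x 13860) * hkTotal
      + (hkConst.take (PySem.Int.mod x 13860).toNat).sum  -- sum(_CONST[: x % _L])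

-- ===== PRECONDITION & SPEC =====
def Spec_hoch_komplexe_funktion_eins (x : Int) (out : Int) : Prop := out = hoch_komplexe_funktion_eins_alt x
instance (x : Int) (out : Int) : Decidable (Spec_hoch_komplexe_funktion_eins x out) := by unfold Spec_hoch_komplexe_funktion_eins; infer_instance

-- ===== CLAIM (what is proved, stated in full; the proofs are below) =====
def Claim_equal_hoch_komplexe_funktion_eins : Prop := ∀ (x : Int), Dom_hoch_komplexe_funktion_eins x → Spec_hoch_komplexe_funktion_eins x (hoch_komplexe_funktion_eins x)

-- ===== LEMMAS AND PROOFS =====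

-- the per-index contribution, abstractly
def hkG (i : Int) : Int := (if PySem.Int.mod i 2 = 0 then i else -i) + hkC i

lemma hkStep_eq (r i : Int) : hkStep r i = r + hkG i := by
  have h3 : PySem.List.pyRange 0 3 1 = [0, 1, 2] := by decide
  simp only [hkStep, hkG, hkC, h3, List.foldl]
  split_ifs <;> omega

lemma A_succ (n : Int) (h : 0 ≤ n) :
    hoch_komplexe_funktion_eins (n + 1) = hoch_komplexe_funktion_eins n + hkG n := by
  unfold hoch_komplexe_funktion_eins
  rw [PySem.List.pyRange_one_succ_right (by omega : (0:Int) ≤ n), List.foldl_append]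
  simp [hkStep_eq]

lemma hkConst_length : hkConst.length = 13860 := by
  unfold hkConst
  rw [List.length_map, List.length_range]

lemma hkConst_get (r : Nat) (h : r < 13860) : hkConst[r]'(by simpa [hkConst_length]) = hkC (r : Int) := by
  unfold hkConst
  rw [List.getElem_map, List.getElem_range]

-- hkC only looks at residues mod divisors of 13860
lemma hkC_emod (i : Int) : hkC (i % 13860) = hkC i := by
  have mpos : ∀ (a b : Int), 0 < b → PySem.Int.mod a b = a % b := fun a b h => PySem.Int.mod_eq_emod_of_pos h
  have d2 : ∀ a : Int, a % 13860 % 2 = a % 2 := fun a => Int.emod_emod_of_dvd a (by norm_num)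
  have d3 : ∀ a : Int, a % 13860 % 3 = a % 3 := fun a => Int.emod_emod_of_dvd a (by norm_num)
  have d4 : ∀ a : Int, a % 13860 % 4 = a % 4 := fun a => Int.emod_emod_of_dvd a (by norm_num)
  have d5 : ∀ a : Int, a % 13860 % 5 = a % 5 := fun a => Int.emod_emod_of_dvd a (by norm_num)
  have d6 : ∀ a : Int, a % 13860 % 6 = a % 6 := fun a => Int.emod_emod_of_dvd a (by norm_num)
  have d7 : ∀ a : Int, a % 13860 % 7 = a % 7 := fun a => Int.emod_emod_of_dvd a (by norm_num)
  have d9 : ∀ a : Int, a % 13860 % 9 = a % 9 := fun a => Int.emod_emod_of_dvd a (by norm_num)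
  have d11 : ∀ a : Int, a % 13860 % 11 = a % 11 := fun a => Int.emod_emod_of_dvd a (by norm_num)
  simp only [hkC, mpos _ 2 (by norm_num), mpos _ 3 (by norm_num), mpos _ 4 (by norm_num),
    mpos _ 5 (by norm_num), mpos _ 6 (by norm_num), mpos _ 7 (by norm_num),
    mpos _ 9 (by norm_num), mpos _ 11 (by norm_num), d2, d3, d4, d5, d6, d7, d9, d11]

-- B's value at a nonnegative argument, in Nat-indexed form
lemma alt_formula (n : Nat) :
    hoch_komplexe_funktion_eins_alt (n : Int) =
      (if n % 2 = 0 then -((n / 2 : Nat) : Int) else (((n - 1) / 2 : Nat) : Int))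
      + ((n / 13860 : Nat) : Int) * hkTotal + (hkConst.take (n % 13860)).sum := by
  unfold hoch_komplexe_funktion_eins_alt
  rcases Nat.eq_zero_or_pos n with h0 | hpos
  · subst h0; simp
  · rw [if_neg (by omega : ¬ ((n : Nat) : Int) ≤ 0)]
    have hm2 : PySem.Int.mod (n : Int) 2 = ((n % 2 : Nat) : Int) := by exact_mod_cast PySem.Int.mod_natCast n 2
    have hd2 : PySem.Int.floordiv (n : Int) 2 = ((n / 2 : Nat) : Int) := by exact_mod_cast PySem.Int.floordiv_natCast n 2
    have hsub : ((n : Int) - 1) = ((n - 1 : Nat) : Int) := by omega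
    have hd2' : PySem.Int.floordiv ((n : Int) - 1) 2 = (((n - 1) / 2 : Nat) : Int) := by
      rw [hsub]; exact_mod_cast PySem.Int.floordiv_natCast (n - 1) 2
    have hdL : PySem.Int.floordiv (n : Int) 13860 = ((n / 13860 : Nat) : Int) := by exact_mod_cast PySem.Int.floordiv_natCast n 13860
    have hmL : PySem.Int.mod (n : Int) 13860 = ((n % 13860 : Nat) : Int) := by exact_mod_cast PySem.Int.mod_natCast n 13860
    rw [hm2, hd2, hd2', hdL, hmL]
    have : (((n % 13860 : Nat) : Int)).toNat = n % 13860 := by omega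
    rw [this]
    by_cases hp : n % 2 = 0
    · rw [if_pos hp, if_pos (by exact_mod_cast congrArg (Nat.cast : Nat → Int) hp)]
    · rw [if_neg hp, if_neg (by exact_mod_cast fun h => hp (by exact_mod_cast h))]

lemma alt_succ (n : Nat) :
    hoch_komplexe_funktion_eins_alt ((n : Int) + 1) = hoch_komplexe_funktion_eins_alt (n : Int) + hkG (n : Int) := by
  have hcast : ((n : Int) + 1) = ((n + 1 : Nat) : Int) := by push_cast; ring
  rw [hcast, alt_formula, alt_formula]
  have hGn : hkG (n : Int) = (if n % 2 = 0 then (n : Int) else -(n : Int)) + hkC ((n % 13860 : Nat) : Int) := by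
    unfold hkG
    have hc13860 : ((n % 13860 : Nat) : Int) = (n : Int) % 13860 := by push_cast; ring
    rw [hc13860, hkC_emod]
    have hm2 : PySem.Int.mod (n : Int) 2 = ((n % 2 : Nat) : Int) := by exact_mod_cast PySem.Int.mod_natCast n 2
    rw [hm2]
    by_cases hp : n % 2 = 0
    · rw [if_pos hp, if_pos (by exact_mod_cast congrArg (Nat.cast : Nat → Int) hp)]
    · rw [if_neg hp, if_neg (by exact_mod_cast fun h => hp (by exact_mod_cast h))]
  rw [hGn]
  -- parity part
  have hpar : (if (n + 1) % 2 = 0 then -(((n + 1) / 2 : Nat) : Int) else ((((n + 1) - 1) / 2 : Nat) : Int))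
      = (if n % 2 = 0 then -((n / 2 : Nat) : Int) else (((n - 1) / 2 : Nat) : Int))
        + (if n % 2 = 0 then (n : Int) else -(n : Int)) := by
    by_cases hp : n % 2 = 0
    · rw [if_neg (by omega), if_pos hp, if_pos hp]; simp; omega
    · rw [if_pos (by omega), if_neg hp, if_neg hp]; push_cast; omega
  rw [hpar]
  -- periodic part
  rcases Nat.lt_or_ge (n % 13860) 13859 with hr | hr
  · have hd : (n + 1) / 13860 = n / 13860 := by omega
    have hm : (n + 1) % 13860 = n % 13860 + 1 := by omega
    rw [hd, hm, List.sum_take_succ _ _ (by simpa [hkConst_length] using (by omega : n % 13860 < 13860)),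
        hkConst_get (n % 13860) (by omega)]
    ring
  · have hr' : n % 13860 = 13859 := by omega
    have hd : (n + 1) / 13860 = n / 13860 + 1 := by omega
    have hm : (n + 1) % 13860 = 0 := by omega
    have htot : hkTotal = (hkConst.take 13859).sum + hkC ((13859 : Nat) : Int) := by
      have h1 : hkConst.take 13860 = hkConst := by
        rw [List.take_of_length_le (by rw [hkConst_length])]
      have h2 := List.sum_take_succ hkConst 13859 (by rw [hkConst_length]; omega)
      rw [hkConst_get 13859 (by omega)] at h2
      calc hkTotal = (hkConst.take 13860).sum := by rw [h1]; rfl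
        _ = (hkConst.take 13859).sum + hkC ((13859 : Nat) : Int) := h2
    rw [hd, hm, hr']
    simp only [List.take_zero, List.sum_nil]
    rw [htot]
    push_cast
    ring

lemma main_eq (n : Nat) : hoch_komplexe_funktion_eins (n : Int) = hoch_komplexe_funktion_eins_alt (n : Int) := by
  induction n with
  | zero =>
      unfold hoch_komplexe_funktion_eins hoch_komplexe_funktion_eins_alt
      rw [PySem.List.pyRange_one_eq_nil (by norm_num)]
      norm_num
  | succ k ih =>
      have hc : ((k + 1 : Nat) : Int) = (k : Int) + 1 := by push_cast; ring
      rw [hc, A_succ (k : Int) (by positivity), alt_succ, ih]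

-- ===== VERDICT (by name: the statement is the Claim_ definition above) =====
theorem hoch_komplexe_funktion_eins_spec : Claim_equal_hoch_komplexe_funktion_eins := by
  intro x _
  unfold Spec_hoch_komplexe_funktion_eins
  by_cases hx : x ≤ 0
  · unfold hoch_komplexe_funktion_eins hoch_komplexe_funktion_eins_alt
    rw [PySem.List.pyRange_one_eq_nil hx, if_pos hx]
    rfl
  · have : x = ((x.toNat : Nat) : Int) := by omega
    rw [this]
    exact main_eq x.toNat
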